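-- pv_equiv track=rewrite | github.com/lst15/didico27-10 | main.py | _order_dados_fields
-- ===== SOURCE A (Python) =====
-- from typing import Iterable, Sequence
--
-- _PREFERRED_DADOS_FIELDS = (
--     "cpf",
--     "nome",
--     "data_nascimento",
--     "beneficio",
--     "banco_agencia",
--     "banco_conta",
-- )
--
-- def _order_dados_fields(
--     existing_fields: Sequence[str], new_fields: Iterable[str]
-- ) -> list[str]:
--     """Return the desired ``dados.txt`` field order combining existing and new fields."""
--
--     combined_fields = set(existing_fields) | set(new_fields)
--     ordered_fields: list[str] = []
--
--     for field in _PREFERRED_DADOS_FIELDS: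
--         if field in combined_fields:
--             ordered_fields.append(field)
--
--     remaining_fields = sorted(combined_fields - set(ordered_fields))
--     ordered_fields.extend(remaining_fields)
--     return ordered_fields
-- ===== SOURCE B (Python) =====
-- from typing import Iterable, Sequence
--
-- _PREFERRED_DADOS_FIELDS = (
--     "cpf",
--     "nome",
--     "data_nascimento",
--     "beneficio",
--     "banco_agencia",
--     "banco_conta",
-- )
--
-- def _order_dados_fields(
--     existing_fields: Sequence[str], new_fields: Iterable[str]
-- ) -> list[str]:
--     """Single composite-key sort: preferred fields first (by their preferred
--     position), then everything else alphabetically."""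
--     rank = {field: index for index, field in enumerate(_PREFERRED_DADOS_FIELDS)}
--     default = len(_PREFERRED_DADOS_FIELDS)
--     combined = set(existing_fields) | set(new_fields)
--     return sorted(combined, key=lambda field: (rank.get(field, default), field))
-- ===== Notes on version B (the rewrite author's own statement) =====
-- stated objective: simpler
-- what changed: Replaces A's two-phase structure (loop over the preferred tuple collecting present fields, then a separate sort of the leftover set-difference) with one sort of the combined set under a composite key (rank-in-preferred-list with len as default, then field name).
import Mathlib
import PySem

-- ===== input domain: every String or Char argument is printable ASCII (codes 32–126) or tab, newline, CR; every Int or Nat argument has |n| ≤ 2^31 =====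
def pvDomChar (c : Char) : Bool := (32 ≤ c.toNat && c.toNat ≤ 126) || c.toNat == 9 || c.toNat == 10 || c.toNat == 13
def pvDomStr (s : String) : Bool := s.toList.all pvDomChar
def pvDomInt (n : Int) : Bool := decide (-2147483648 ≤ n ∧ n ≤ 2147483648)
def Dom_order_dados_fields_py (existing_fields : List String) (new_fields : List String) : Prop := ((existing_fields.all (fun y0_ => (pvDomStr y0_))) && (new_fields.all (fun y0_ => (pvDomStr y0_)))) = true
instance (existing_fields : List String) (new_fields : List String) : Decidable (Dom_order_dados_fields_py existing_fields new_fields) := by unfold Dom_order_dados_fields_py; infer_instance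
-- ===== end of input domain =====

-- B replaces A's two-phase structure (preferred loop, then sorting the leftover set difference)
-- by ONE composite-key sort of the combined set (rank in the preferred list, then name); same output.

-- _PREFERRED_DADOS_FIELDS (module constant used by both versions)
def pvPreferred : List String :=
  ["cpf", "nome", "data_nascimento", "beneficio", "banco_agencia", "banco_conta"]

-- ===== PORT A =====
def order_dados_fields_py (existing_fields : List String) (new_fields : List String) : List String :=
  -- combined_fields = set(existing_fields) | set(new_fields)
  let combined : PySem.Set String :=
    PySem.Set.union (PySem.Set.ofList existing_fields) (PySem.Set.ofList new_fields)
  -- for field in _PREFERRED_DADOS_FIELDS: if field in combined_fields: ordered_fields.append(field)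
  let ordered : List String :=
    pvPreferred.foldl (fun acc field =>
      if PySem.Set.contains combined field then acc ++ [field] else acc) []
  -- remaining_fields = sorted(combined_fields - set(ordered_fields))
  let remaining : List String :=
    PySem.List.sorted (PySem.Set.diff combined (PySem.Set.ofList ordered)) (fun x => x) false
  ordered ++ remaining

-- ===== PORT B =====
def order_dados_fields_py_alt (existing_fields : List String) (new_fields : List String) : List String :=
  -- rank = {field: index for index, field in enumerate(_PREFERRED_DADOS_FIELDS)}
  let rank : PySem.Dict String Int :=
    (PySem.List.enumerate pvPreferred 0).foldl (fun d p => d.insert p.2 p.1) PySem.Dict.empty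
  -- default = len(_PREFERRED_DADOS_FIELDS)
  let dflt : Int := (pvPreferred.length : Int)
  -- combined = set(existing_fields) | set(new_fields)
  let combined : PySem.Set String :=
    PySem.Set.union (PySem.Set.ofList existing_fields) (PySem.Set.ofList new_fields)
  -- sorted(combined, key=lambda field: (rank.get(field, default), field))
  PySem.List.sorted2 combined (fun f => rank.getD f dflt) (fun f => f) false

-- ===== PRECONDITION & SPEC =====
def Spec_order_dados_fields_py (existing_fields : List String) (new_fields : List String) (out : List String) : Prop := out = order_dados_fields_py_alt existing_fields new_fields
instance (existing_fields : List String) (new_fields : List String) (out : List String) : Decidable (Spec_order_dados_fields_py existing_fields new_fields out) := by unfold Spec_order_dados_fields_py; infer_instance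

-- ===== CLAIM (what is proved, stated in full; the proofs are below) =====
def Claim_equal_order_dados_fields_py : Prop := ∀ (existing_fields : List String) (new_fields : List String), Dom_order_dados_fields_py existing_fields new_fields → Spec_order_dados_fields_py existing_fields new_fields (order_dados_fields_py existing_fields new_fields)

-- ===== LEMMAS AND PROOFS =====

-- B's rank dictionary and composite-key rank function, named for the proofs
def pvRank : PySem.Dict String Int :=
  (PySem.List.enumerate pvPreferred 0).foldl (fun d p => d.insert p.2 p.1) PySem.Dict.empty

def pvK1 (f : String) : Int := pvRank.getD f (pvPreferred.length : Int)

-- B's comparison: lexicographic on (rank, name)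
def pvBefore (a b : String) : Bool :=
  decide (pvK1 a < pvK1 b) || (!decide (pvK1 b < pvK1 a) && decide (a < b))

lemma pvK1_of_not_mem {f : String} (h : f ∉ pvPreferred) : pvK1 f = 6 := by
  simp [pvPreferred] at h
  obtain ⟨h1, h2, h3, h4, h5, h6⟩ := h
  simp [pvK1, pvRank, pvPreferred, PySem.List.enumerate, PySem.Dict.getD_insert, h1, h2, h3, h4, h5, h6]

lemma pvK1_lt_of_mem {f : String} (h : f ∈ pvPreferred) : pvK1 f < 6 := by
  have : pvPreferred.all (fun f => decide (pvK1 f < 6)) = true := by decide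
  have := List.all_eq_true.mp this f h
  simpa using this

lemma pvPreferred_pairwise : pvPreferred.Pairwise (fun a b => pvK1 a < pvK1 b) := by
  have : List.Pairwise (fun a b => decide (pvK1 a < pvK1 b) = true) pvPreferred := by decide
  exact this.imp (fun h => of_decide_eq_true h)

lemma pvPreferred_nodup : pvPreferred.Nodup := by decide

-- generic insertion-sort characterisation for a strict-order boolean comparison
lemma insertBy_pairwise_notBefore {α : Type} (before : α → α → Bool)
    (asym : ∀ a b, before a b = true → before b a = false)
    (trans : ∀ a b c, before a b = true → before b c = true → before a c = true)
    (x : α) (ys : List α) (h : ys.Pairwise (fun a b => before b a = false)) :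
    (PySem.List.insertBy before x ys).Pairwise (fun a b => before b a = false) := by
  induction ys with
  | nil => simp [PySem.List.insertBy]
  | cons y ys ih =>
    rw [PySem.List.insertBy.eq_2]
    rcases List.pairwise_cons.mp h with ⟨hy, hys⟩
    by_cases hxy : before x y = true
    · simp only [hxy, if_true]
      refine List.pairwise_cons.mpr ⟨?_, h⟩
      intro z hz
      rcases List.mem_cons.mp hz with rfl | hz
      · exact asym _ _ hxy
      · cases hb : before z x with
        | false => rfl
        | true =>
          have := trans _ _ _ hb hxy
          rw [hy z hz] at this
          exact absurd this Bool.false_ne_true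
    · simp only [hxy]
      refine List.pairwise_cons.mpr ⟨?_, ih hys⟩
      intro z hz
      rcases (PySem.List.insertBy_mem_iff before x z ys).mp hz with rfl | hz
      · exact Bool.eq_false_iff.mpr hxy
      · exact hy z hz

lemma foldl_insertBy_pairwise {α : Type} (before : α → α → Bool)
    (asym : ∀ a b, before a b = true → before b a = false)
    (trans : ∀ a b c, before a b = true → before b c = true → before a c = true)
    (xs : List α) (init : List α) (hinit : init.Pairwise (fun a b => before b a = false)) :
    (xs.foldl (fun acc x => PySem.List.insertBy before x acc) init).Pairwise
      (fun a b => before b a = false) := by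
  induction xs generalizing init with
  | nil => simpa using hinit
  | cons x xs ih =>
    simp only [List.foldl_cons]
    exact ih _ (insertBy_pairwise_notBefore before asym trans x init hinit)

lemma foldl_insertBy_perm {α : Type} (before : α → α → Bool) (xs init : List α) :
    (xs.foldl (fun acc x => PySem.List.insertBy before x acc) init).Perm (init ++ xs) := by
  induction xs generalizing init with
  | nil => simp
  | cons x xs ih =>
    simp only [List.foldl_cons]
    refine (ih (PySem.List.insertBy before x init)).trans ?_
    refine (((PySem.List.insertBy_perm before x init).append_right xs).trans ?_)
    simpa using (List.perm_middle (a := x) (l₁ := init) (l₂ := xs)).symm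

lemma pvBefore_true_iff (a b : String) :
    pvBefore a b = true ↔ (pvK1 a < pvK1 b ∨ (¬ pvK1 b < pvK1 a ∧ a < b)) := by
  simp [pvBefore]

lemma pvBefore_false_iff (a b : String) :
    pvBefore a b = false ↔ (¬ pvK1 a < pvK1 b ∧ (pvK1 b < pvK1 a ∨ ¬ a < b)) := by
  rw [← Bool.not_eq_true, pvBefore_true_iff]
  by_cases h1 : pvK1 a < pvK1 b <;> by_cases h2 : pvK1 b < pvK1 a <;>
    by_cases h3 : a < b <;> simp [h1, h2, h3]

theorem order_dados_fields_py_spec_aux (ex nf : List String) :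
    order_dados_fields_py ex nf = order_dados_fields_py_alt ex nf := by
  -- names
  set S : PySem.Set String :=
    PySem.Set.union (PySem.Set.ofList ex) (PySem.Set.ofList nf) with hS
  have hSnodup : S.Nodup :=
    PySem.Set.nodup_union _ _ (PySem.Set.nodup_ofList ex)
  -- A's pieces
  have hordered :
      pvPreferred.foldl (fun acc field =>
        if PySem.Set.contains S field then acc ++ [field] else acc) []
      = pvPreferred.filter (fun field => PySem.Set.contains S field) := by
    have := PySem.List.foldl_append_if (fun field => PySem.Set.contains S field)
      (fun x => x) pvPreferred []
    simpa using this
  set P : List String := pvPreferred.filter (fun field => PySem.Set.contains S field) with hP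
  set R : List String :=
    PySem.List.sorted (PySem.Set.diff S (PySem.Set.ofList P)) (fun x => x) false with hR
  have hA : order_dados_fields_py ex nf = P ++ R := by
    simp only [order_dados_fields_py, ← hS, hordered, ← hR]
  -- B as an insertBy fold
  have hB : order_dados_fields_py_alt ex nf =
      S.foldl (fun acc x => PySem.List.insertBy pvBefore x acc) [] := rfl
  -- membership facts
  have hmemP : ∀ {f : String}, f ∈ P → f ∈ pvPreferred ∧ f ∈ S := by
    intro f hf
    have := List.mem_filter.mp hf
    exact ⟨this.1, (PySem.Set.contains_iff _ _).mp this.2⟩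
  have hmemR : ∀ {f : String}, f ∈ R → f ∈ S ∧ f ∉ pvPreferred := by
    intro f hf
    have hf' : f ∈ PySem.Set.diff S (PySem.Set.ofList P) :=
      ((PySem.List.sorted_perm _ _ _).mem_iff).mp hf
    rcases (PySem.Set.mem_diff _ _ _).mp hf' with ⟨hfS, hfP⟩
    refine ⟨hfS, fun hpre => ?_⟩
    exact hfP ((PySem.Set.mem_ofList _ _).mpr (List.mem_filter.mpr
      ⟨hpre, (PySem.Set.contains_iff _ _).mpr hfS⟩))
  -- before facts
  have hbeforeP : ∀ {a b : String}, pvK1 a < pvK1 b → pvBefore b a = false := by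
    intro a b h
    rw [pvBefore_false_iff]
    exact ⟨by omega, Or.inl h⟩
  have hbeforeR : ∀ {a b : String}, pvK1 a = pvK1 b → a < b → pvBefore b a = false := by
    intro a b hk h
    rw [pvBefore_false_iff]
    exact ⟨by omega, Or.inr (asymm h)⟩
  -- asymmetry / transitivity of pvBefore
  have hasym : ∀ a b : String, pvBefore a b = true → pvBefore b a = false := by
    intro a b h
    rw [pvBefore_true_iff] at h
    rw [pvBefore_false_iff]
    rcases h with h | ⟨h1, h2⟩
    · exact ⟨by omega, Or.inl h⟩
    · exact ⟨h1, Or.inr (asymm h2)⟩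
  have htrans : ∀ a b c : String, pvBefore a b = true → pvBefore b c = true → pvBefore a c = true := by
    intro a b c hab hbc
    rw [pvBefore_true_iff] at hab hbc ⊢
    rcases hab with hab | ⟨hab1, hab2⟩ <;> rcases hbc with hbc | ⟨hbc1, hbc2⟩
    · exact Or.inl (lt_trans hab hbc)
    · exact Or.inl (lt_of_lt_of_le hab (not_lt.mp hbc1))
    · exact Or.inl (lt_of_le_of_lt (not_lt.mp hab1) hbc)
    · exact Or.inr ⟨by omega, lt_trans hab2 hbc2⟩
  -- the A-side list is pairwise "not before backwards"
  have hPpair : P.Pairwise (fun a b => pvBefore b a = false) := by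
    refine (List.Pairwise.filter _ pvPreferred_pairwise).imp ?_
    intro a b h
    exact hbeforeP h
  have hRle : R.Pairwise (fun a b : String => a ≤ b) := by
    have := PySem.List.sorted_pairwise (PySem.Set.diff S (PySem.Set.ofList P)) (fun x : String => x)
    simpa [hR] using this
  have hRnodup : R.Nodup := by
    rw [hR]
    exact (PySem.List.sorted_perm _ _ _).nodup_iff.mpr (PySem.Set.nodup_diff _ _ hSnodup)
  have hRpair : R.Pairwise (fun a b => pvBefore b a = false) := by
    have hlt : R.Pairwise (fun a b : String => a < b) :=
      (List.pairwise_and_iff.mpr ⟨hRle, hRnodup⟩).imp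
        (fun h => lt_of_le_of_ne h.1 h.2)
    refine List.Pairwise.imp_of_mem ?_ hlt
    intro a b ha hb h
    have hka : pvK1 a = 6 := pvK1_of_not_mem (hmemR ha).2
    have hkb : pvK1 b = 6 := pvK1_of_not_mem (hmemR hb).2
    exact hbeforeR (hka.trans hkb.symm) h
  have hApair : (P ++ R).Pairwise (fun a b => pvBefore b a = false) := by
    refine (List.pairwise_append).mpr ⟨hPpair, hRpair, ?_⟩
    intro a ha b hb
    have hka : pvK1 a < 6 := pvK1_lt_of_mem (hmemP ha).1
    have hkb : pvK1 b = 6 := pvK1_of_not_mem (hmemR hb).2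
    exact hbeforeP (by omega)
  -- the B-side list is pairwise too
  have hBpair : (S.foldl (fun acc x => PySem.List.insertBy pvBefore x acc) []).Pairwise
      (fun a b => pvBefore b a = false) :=
    foldl_insertBy_pairwise pvBefore hasym htrans S [] (by simp)
  -- permutations
  have hPnodup : P.Nodup := List.Nodup.filter _ pvPreferred_nodup
  have hAperm : (P ++ R).Perm S := by
    have hnodupPR : (P ++ R).Nodup := by
      refine List.nodup_append.mpr ⟨hPnodup, hRnodup, ?_⟩
      intro a ha b hb
      exact fun h => (hmemR hb).2 (h ▸ (hmemP ha).1)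
    refine (List.perm_ext_iff_of_nodup hnodupPR hSnodup).mpr ?_
    intro a
    constructor
    · intro h
      rcases List.mem_append.mp h with h | h
      · exact (hmemP h).2
      · exact (hmemR h).1
    · intro h
      by_cases hp : a ∈ P
      · exact List.mem_append.mpr (Or.inl hp)
      · refine List.mem_append.mpr (Or.inr ?_)
        rw [hR]
        refine ((PySem.List.sorted_perm _ _ _).mem_iff).mpr ?_
        refine (PySem.Set.mem_diff _ _ _).mpr ⟨h, fun hm => ?_⟩
        exact hp ((PySem.Set.mem_ofList _ _).mp hm)
  have hBperm : (S.foldl (fun acc x => PySem.List.insertBy pvBefore x acc) []).Perm S := by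
    simpa using foldl_insertBy_perm pvBefore S []
  -- antisymmetry on the members, and conclude
  have hanti : ∀ a b : String, pvBefore b a = false → pvBefore a b = false → a = b := by
    intro a b h1 h2
    rw [pvBefore_false_iff] at h1 h2
    rcases h1 with ⟨h1k, h1r⟩
    rcases h2 with ⟨h2k, h2r⟩
    have ha : ¬ b < a := by
      rcases h1r with h | h
      · exact absurd h h2k
      · exact h
    have hb : ¬ a < b := by
      rcases h2r with h | h
      · exact absurd h h1k
      · exact h
    exact le_antisymm (not_lt.mp ha) (not_lt.mp hb)
  rw [hA, hB]
  exact List.Perm.eq_of_pairwise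
    (fun a b _ _ hab hba => hanti a b hab hba) hApair hBpair
    (hAperm.trans hBperm.symm)

-- ===== VERDICT (by name: the statement is the Claim_ definition above) =====
theorem order_dados_fields_py_spec : Claim_equal_order_dados_fields_py := by
  intro ex nf _
  show _ = _
  exact order_dados_fields_py_spec_aux ex nf
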